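-- pv_equiv track=rewrite | github.com/shunn2/forcodingtest | etc/sk/3.py | solution
-- ===== SOURCE A (Python) =====
-- def solution(n, plans, clients):
--     answer=[]
--     all_plan = []
--     additional = []
--     for i in range(len(plans)):
--         plan = plans[i].split(' ')
--         additional = plan[1:] + additional
--         additional.sort()
--         plan[1:]=additional
--         all_plan.append(plan)
--     for i in range(len(clients)):
--         result = 0
--         client = clients[i].split(' ')
--         temp = True
--         index=[]
--         for j in range(len(all_plan)):
--             temp = True
--             if(client[0]>all_plan[j][0]):
--                 temp = False
--                 continue
--             else:
--                 for k in range(len(client)-1):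
--                     if client[k+1] not in all_plan[j][1:]:
--                         temp = False
--                         break
--             if(temp):
--                 index.append(j+1)
--         if(len(index)):
--             answer.append(min(index))
--     return answer
-- ===== SOURCE B (Python) =====
-- def solution(n, plans, clients):
--     # Index pass: first plan index introducing each item, plus the plan price tokens.
--     first = {}
--     prices = []
--     for i, p in enumerate(plans):
--         toks = p.split(' ')
--         prices.append(toks[0])
--         for it in toks[1:]:
--             if it not in first:
--                 first[it] = i
--     answer = []
--     for c in clients:
--         ctoks = c.split(' ')
--         price = ctoks[0]
--         j0 = 0
--         ok = True
--         for it in ctoks[1:]: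
--             if it not in first:
--                 ok = False
--                 break
--             j0 = max(j0, first[it])
--         if not ok:
--             continue
--         for j in range(j0, len(prices)):
--             if price <= prices[j]:
--                 answer.append(j + 1)
--                 break
--     return answer
-- ===== Notes on version B (the rewrite author's own statement) =====
-- stated objective: faster
-- what changed: Instead of A's cumulative re-sorted item list per plan and a per-client scan over ALL plans with repeated linear membership tests, B builds once a dict mapping each item to the first plan index introducing it, takes per client the max of those indices as a threshold, and scans plan prices from that threshold for the first qualifying plan.
import Mathlib
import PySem

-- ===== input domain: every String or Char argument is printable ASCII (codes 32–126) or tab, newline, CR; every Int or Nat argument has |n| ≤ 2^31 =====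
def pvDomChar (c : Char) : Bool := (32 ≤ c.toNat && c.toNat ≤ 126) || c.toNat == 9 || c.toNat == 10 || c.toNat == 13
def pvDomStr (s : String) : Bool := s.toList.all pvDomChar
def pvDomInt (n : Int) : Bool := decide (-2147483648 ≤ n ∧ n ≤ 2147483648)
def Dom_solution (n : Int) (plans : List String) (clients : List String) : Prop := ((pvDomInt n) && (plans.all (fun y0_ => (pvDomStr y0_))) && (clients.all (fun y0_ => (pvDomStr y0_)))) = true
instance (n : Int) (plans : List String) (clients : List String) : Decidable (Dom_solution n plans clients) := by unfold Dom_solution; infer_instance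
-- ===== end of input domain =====

-- B replaces A's per-plan cumulative sorted item list and full per-client plan scan by a
-- first-appearance index table plus a threshold scan over plan prices (objective: faster).
-- Tokens are handled as List Char (Python str) via PySem.Chars; string '<' is code-point lexicographic.

-- ===== PORT A =====
-- inner k-loop of A (membership of each required item in the plan's item list, with break)
def chkA : List (List Char) → List (List Char) → Bool
  | [], _ => true
  | x :: xs, pool => if !(pool.contains x) then false else chkA xs pool

def solution (n : Int) (plans : List String) (clients : List String) : List Int :=
  -- first loop: all_plan (first component) and the cumulative sorted `additional` (second)
  let ap := (plans.foldl (fun (st : List (List (List Char)) × List (List Char)) s =>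
      let plan := PySem.Chars.splitOn s.toList [' ']
      let add := PySem.List.sorted (plan.drop 1 ++ st.2) (fun x => x) false
      (st.1 ++ [plan.take 1 ++ add], add)) ([], [])).1
  clients.foldl (fun answer c =>
      let client := PySem.Chars.splitOn c.toList [' ']
      let index := (PySem.List.enumerate ap).foldl (fun idx jp =>
          if decide (jp.2.headD [] < client.headD []) then idx   -- client[0] > all_plan[j][0]
          else if chkA (client.drop 1) (jp.2.drop 1) then idx ++ [jp.1 + 1] else idx) []
      match PySem.List.min? index (fun x => x) with
      | some m => answer ++ [m]
      | none => answer) []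

-- ===== PORT B =====
-- scan of Source B's final `for j in range(j0, len(prices))` loop with break
def scanB (price : List Char) : List (List Char) → Int → Option Int
  | [], _ => none
  | p :: ps, j => if !decide (p < price) then some (j + 1) else scanB price ps (j + 1)

def solution_alt (n : Int) (plans : List String) (clients : List String) : List Int :=
  let first := (PySem.List.enumerate plans).foldl (fun d jp =>
      ((PySem.Chars.splitOn jp.2.toList [' ']).drop 1).foldl (fun d it =>
          if d.contains it then d else d.insert it jp.1) d) PySem.Dict.empty
  let prices := plans.map (fun p => (PySem.Chars.splitOn p.toList [' ']).headD [])  -- toks[0]; splitOn is never []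
  clients.foldl (fun ans c =>
      let ctoks := PySem.Chars.splitOn c.toList [' ']
      let price := ctoks.headD []   -- ctoks[0]; splitOn is never []
      let j0? := (ctoks.drop 1).foldl (fun (acc : Option Int) it =>
          match acc, first.get? it with
          | some a, some v => some (max a v)
          | _, _ => none) (some 0)
      match j0? with
      | none => ans
      | some j0 =>
        match scanB price (prices.drop j0.toNat) j0 with
        | some r => ans ++ [r]
        | none => ans) []

-- ===== PRECONDITION & SPEC =====
def Spec_solution (n : Int) (plans : List String) (clients : List String) (out : List Int) : Prop := out = solution_alt n plans clients
instance (n : Int) (plans : List String) (clients : List String) (out : List Int) : Decidable (Spec_solution n plans clients out) := by unfold Spec_solution; infer_instance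

-- ===== CLAIM (what is proved, stated in full; the proofs are below) =====
def Claim_equal_solution : Prop := ∀ (n : Int) (plans : List String) (clients : List String), Dom_solution n plans clients → Spec_solution n plans clients (solution n plans clients)

-- ===== LEMMAS AND PROOFS =====

-- spec-side views of a plan/client string: its space-token list, price token, item tokens
def toksOf (p : String) : List (List Char) := PySem.Chars.splitOn p.toList [' ']
def prOf (p : String) : List Char := (toksOf p).headD []
def itsOf (p : String) : List (List Char) := (toksOf p).drop 1

lemma go_ne_nil (sep : List Char) : ∀ (fuel : Nat) (l cur : List Char) (acc : List (List Char)),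
    PySem.Chars.splitOn.go sep fuel l cur acc ≠ [] := by
  intro fuel
  induction fuel with
  | zero => intro l cur acc; simp [PySem.Chars.splitOn.go]
  | succ n ih =>
    intro l cur acc
    cases l with
    | nil => simp [PySem.Chars.splitOn.go]
    | cons c rest =>
      rw [PySem.Chars.splitOn.go]
      split <;> [exact ih _ _ _; exact ih _ _ _]

lemma toksOf_ne_nil (p : String) : toksOf p ≠ [] := by
  rw [toksOf, PySem.Chars.splitOn]; exact go_ne_nil _ _ _ _ _

lemma toksOf_cons (p : String) : toksOf p = prOf p :: itsOf p := by
  rcases h : toksOf p with _ | ⟨t, ts⟩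
  · exact absurd h (toksOf_ne_nil p)
  · simp [prOf, itsOf, h]

-- what A's first loop builds, and B's first-occurrence index
def buildA (add : List (List Char)) : List String → List (List (List Char))
  | [] => []
  | p :: ps =>
    let add' := PySem.List.sorted (itsOf p ++ add) (fun x => x) false
    ((toksOf p).take 1 ++ add') :: buildA add' ps

def addFin (add : List (List Char)) : List String → List (List Char)
  | [] => add
  | p :: ps => addFin (PySem.List.sorted (itsOf p ++ add) (fun x => x) false) ps

def fiN (x : List Char) : List String → Option Nat
  | [] => none
  | p :: ps => if x ∈ itsOf p then some 0 else (fiN x ps).map (· + 1)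

lemma foldlA_eq : ∀ (ps : List String) (acc : List (List (List Char))) (add : List (List Char)),
    (ps.foldl (fun (st : List (List (List Char)) × List (List Char)) s =>
      let plan := PySem.Chars.splitOn s.toList [' ']
      let add := PySem.List.sorted (plan.drop 1 ++ st.2) (fun x => x) false
      (st.1 ++ [plan.take 1 ++ add], add)) (acc, add))
    = (acc ++ buildA add ps, addFin add ps) := by
  intro ps
  induction ps with
  | nil => intro acc add; simp [buildA, addFin]
  | cons p ps ih =>
    intro acc add
    simp only [List.foldl_cons, buildA, addFin]
    rw [ih]
    simp [toksOf, itsOf]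

lemma length_buildA : ∀ (ps : List String) (add : List (List Char)), (buildA add ps).length = ps.length := by
  intro ps
  induction ps with
  | nil => intro add; rfl
  | cons p ps ih => intro add; simp [buildA, ih]

lemma buildA_get : ∀ (ps : List String) (add : List (List Char)) (j : Nat) (h : j < ps.length),
    ∃ tl, (buildA add ps)[j]? = some ((toksOf ps[j]).take 1 ++ tl) ∧
      ∀ x, x ∈ tl ↔ x ∈ (ps.take (j+1)).flatMap itsOf ∨ x ∈ add := by
  intro ps
  induction ps with
  | nil => intro add j h; simp at h
  | cons p ps ih =>
    intro add j h
    cases j with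
    | zero =>
      refine ⟨PySem.List.sorted (itsOf p ++ add) (fun x => x) false, by simp [buildA], fun x => ?_⟩
      rw [(PySem.List.sorted_perm (itsOf p ++ add) (fun x => x) false).mem_iff]
      simp
    | succ j =>
      simp only [List.length_cons, Nat.succ_lt_succ_iff] at h
      obtain ⟨tl, hget, hmem⟩ := ih (PySem.List.sorted (itsOf p ++ add) (fun x => x) false) j h
      refine ⟨tl, by simpa [buildA] using hget, fun x => ?_⟩
      rw [hmem x, (PySem.List.sorted_perm (itsOf p ++ add) (fun x => x) false).mem_iff]
      simp only [List.take_succ_cons, List.flatMap_cons, List.mem_append]; tauto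

lemma chkA_eq_all : ∀ (items pool : List (List Char)), chkA items pool = items.all (fun x => pool.contains x) := by
  intro items pool
  induction items with
  | nil => rfl
  | cons x xs ih => by_cases h : pool.contains x <;> simp [chkA, h, ih]

lemma fiN_lt_length {x : List Char} {ps : List String} {k : Nat} (h : fiN x ps = some k) : k < ps.length := by
  induction ps generalizing k with
  | nil => simp [fiN] at h
  | cons p ps ih =>
    by_cases hm : x ∈ itsOf p
    · simp only [fiN, hm, if_true, Option.some.injEq] at h
      simp only [List.length_cons]; omega
    · simp only [fiN, hm, if_neg, Option.map_eq_some_iff, if_false] at h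
      obtain ⟨k', hk', rfl⟩ := h
      have := ih hk'; simp; omega

lemma cumMem_iff : ∀ (ps : List String) (x : List Char) (j : Nat),
    (x ∈ (ps.take (j+1)).flatMap itsOf) ↔ ∃ k, fiN x ps = some k ∧ k ≤ j := by
  intro ps
  induction ps with
  | nil => simp [fiN]
  | cons p ps ih =>
    intro x j
    by_cases hm : x ∈ itsOf p
    · constructor
      · intro _; exact ⟨0, by simp [fiN, hm], by omega⟩
      · intro _; simp [List.take_succ_cons, hm]
    · cases j with
      | zero => simp [List.take_succ_cons, fiN, hm]
      | succ j =>
        simp only [List.take_succ_cons, List.flatMap_cons, List.mem_append, fiN, hm, if_false,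
          ih x j, false_or]
        constructor
        · rintro ⟨k, hk, hle⟩
          exact ⟨k + 1, by simp [hk], by omega⟩
        · rintro ⟨k, hk, hle⟩
          simp only [Option.map_eq_some_iff] at hk
          obtain ⟨k', hk', rfl⟩ := hk
          exact ⟨k', hk', by omega⟩

lemma dict_inner_get : ∀ (its : List (List Char)) (d : PySem.Dict (List Char) Int) (i : Int) (x : List Char),
    (its.foldl (fun d it => if d.contains it then d else d.insert it i) d).get? x
      = match d.get? x with
        | some v => some v
        | none => if x ∈ its then some i else none := by
  intro its
  induction its with
  | nil => intro d i x; cases h : d.get? x <;> simp [h]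
  | cons it its ih =>
    intro d i x
    simp only [List.foldl_cons]
    by_cases hc : d.contains it = true
    · rw [if_pos hc, ih]
      rcases hd : d.get? x with _ | v
      · by_cases hx : x = it
        · subst hx
          rw [PySem.Dict.contains_eq_isSome_get?, hd] at hc; simp at hc
        · simp [hx]
      · rfl
    · rw [if_neg hc, ih]
      by_cases hx : x = it
      · subst hx
        have hd : d.get? x = none := by
          rw [PySem.Dict.contains_eq_isSome_get?] at hc
          cases h : d.get? x <;> simp [h] at hc ⊢
        rw [hd, PySem.Dict.get?_insert_self]
        simp
      · rw [PySem.Dict.get?_insert_of_ne _ _ hx]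
        rcases hd : d.get? x with _ | v
        · simp [hx]
        · rfl

lemma dict_get : ∀ (ps : List String) (s : Int) (d : PySem.Dict (List Char) Int) (x : List Char),
    ((PySem.List.enumerate ps s).foldl (fun d jp =>
        ((PySem.Chars.splitOn jp.2.toList [' ']).drop 1).foldl (fun d it =>
          if d.contains it then d else d.insert it jp.1) d) d).get? x
      = match d.get? x with
        | some v => some v
        | none => (fiN x ps).map (fun k => s + (k : Int)) := by
  intro ps
  induction ps with
  | nil => intro s d x; cases h : d.get? x <;> simp [h, PySem.List.enumerate, fiN]
  | cons p ps ih =>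
    intro s d x
    rw [PySem.List.enumerate_cons, List.foldl_cons, ih, dict_inner_get]
    rcases hd : d.get? x with _ | v
    · by_cases hm : x ∈ itsOf p
      · simp [itsOf, toksOf] at hm ⊢
        simp [hm, fiN, itsOf, toksOf, hm]
      · simp only [itsOf, toksOf] at hm
        simp only [hm, if_false, fiN]
        rw [if_neg (by simpa [itsOf, toksOf] using hm)]
        cases h : fiN x ps <;> simp [Option.map_map, Function.comp]
        push_cast; ring_nf
    · rfl

lemma min?_eq_head?_of_pairwise : ∀ (l : List Int), l.Pairwise (· < ·) →
    PySem.List.min? l (fun x => x) = l.head? := by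
  intro l hl
  cases l with
  | nil => simp [PySem.List.min?]
  | cons x t =>
    rcases h : PySem.List.min? (x :: t) (fun y => y) with _ | m
    · simp [PySem.List.min?_eq_none_iff] at h
    · have hmem := PySem.List.min?_mem h
      have hmin := PySem.List.min?_isMin h
      have hx : x ≤ m := by
        rcases List.mem_cons.1 hmem with rfl | hmt
        · rfl
        · exact le_of_lt ((List.pairwise_cons.1 hl).1 m hmt)
      have hm : m ≤ x := hmin x (by simp)
      simp [le_antisymm hm hx]

lemma j0_fold (first : PySem.Dict (List Char) Int) : ∀ (items : List (List Char)) (a : Int),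
    (items.foldl (fun (acc : Option Int) it =>
        match acc, first.get? it with
        | some a, some v => some (max a v)
        | _, _ => none) (some a) = none ↔ ∃ it ∈ items, first.get? it = none)
    ∧ ∀ r, items.foldl (fun (acc : Option Int) it =>
        match acc, first.get? it with
        | some a, some v => some (max a v)
        | _, _ => none) (some a) = some r →
      a ≤ r ∧ (∀ it ∈ items, ∃ v, first.get? it = some v ∧ v ≤ r)
        ∧ (r = a ∨ ∃ it ∈ items, first.get? it = some r) := by
  intro items
  induction items with
  | nil => intro a; simp
  | cons it its ih =>
    intro a
    rcases hg : first.get? it with _ | v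
    · constructor
      · simp only [List.foldl_cons, hg]
        have : ∀ (l : List (List Char)), l.foldl (fun (acc : Option Int) it =>
            match acc, first.get? it with
            | some a, some v => some (max a v)
            | _, _ => none) none = none := by
          intro l; induction l with
          | nil => rfl
          | cons y ys ihy => simp only [List.foldl_cons]; cases first.get? y <;> exact ihy
        simp [this]
        exact Or.inl hg
      · intro r hr
        exfalso
        simp only [List.foldl_cons, hg] at hr
        have : ∀ (l : List (List Char)), l.foldl (fun (acc : Option Int) it =>
            match acc, first.get? it with
            | some a, some v => some (max a v)
            | _, _ => none) none = none := by
          intro l; induction l with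
          | nil => rfl
          | cons y ys ihy => simp only [List.foldl_cons]; cases first.get? y <;> exact ihy
        simp [this] at hr
    · obtain ⟨ihn, ihs⟩ := ih (max a v)
      constructor
      · simp only [List.foldl_cons, hg]
        rw [ihn]
        constructor
        · rintro ⟨x, hx, hxg⟩; exact ⟨x, List.mem_cons_of_mem _ hx, hxg⟩
        · rintro ⟨x, hx, hxg⟩
          rcases List.mem_cons.1 hx with rfl | hx'
          · rw [hg] at hxg; cases hxg
          · exact ⟨x, hx', hxg⟩
      · intro r hr
        simp only [List.foldl_cons, hg] at hr
        obtain ⟨h1, h2, h3⟩ := ihs r hr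
        refine ⟨by omega, ?_, ?_⟩
        · intro x hx
          rcases List.mem_cons.1 hx with rfl | hx'
          · exact ⟨v, hg, by omega⟩
          · exact h2 x hx'
        · rcases h3 with h3 | ⟨x, hx, hxg⟩
          · rcases max_choice a v with hm | hm
            · exact Or.inl (by omega)
            · exact Or.inr ⟨it, List.mem_cons_self, by rw [hg, h3, hm]⟩
          · exact Or.inr ⟨x, List.mem_cons_of_mem _ hx, hxg⟩

lemma scanB_spec (price : List Char) (prices : List (List Char)) :
    ∀ (k : Nat), k ≤ prices.length →
    scanB price (prices.drop k) k
      = ((((PySem.List.pyRange k prices.length 1).filter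
            (fun j => !decide (PySem.List.pyGetD prices j [] < price))).map (· + 1)).head?) := by
  intro k
  induction hn : prices.length - k generalizing k with
  | zero =>
    intro hk
    have hkl : k = prices.length := by omega
    subst hkl
    rw [List.drop_length, PySem.List.pyRange_one_eq_nil (le_refl _)]
    rfl
  | succ n ihn =>
    intro hk
    have hlt : k < prices.length := by omega
    rw [List.drop_eq_getElem_cons hlt]
    rw [PySem.List.pyRange_one_cons (by exact_mod_cast hlt)]
    simp only [List.filter_cons]
    have hget : PySem.List.pyGetD prices (k : Int) [] = prices[k] := by
      rw [PySem.List.pyGetD_natCast]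
      exact List.getD_eq_getElem _ _ hlt
    by_cases hp : prices[k] < price
    · rw [scanB]
      simp only [hget, hp, decide_true, Bool.not_true, if_false, Bool.false_eq_true]
      have : ((k : Int) + 1) = ((k + 1 : Nat) : Int) := by push_cast; ring
      rw [this, ihn (k+1) (by omega) (by omega)]
    · rw [scanB]
      simp only [hget, hp, decide_false, Bool.not_false, if_true]
      simp

lemma client_eq (plans : List String) (first : PySem.Dict (List Char) Int)
    (hfirst : ∀ x, first.get? x = (fiN x plans).map (fun k => (k : Int)))
    (c : String) (ans : List Int) :
    (match PySem.List.min?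
        ((PySem.List.enumerate (buildA [] plans)).foldl (fun idx jp =>
          if decide (jp.2.headD [] < (toksOf c).headD []) then idx
          else if chkA ((toksOf c).drop 1) (jp.2.drop 1) then idx ++ [jp.1 + 1] else idx) [])
        (fun x => x) with
      | some m => ans ++ [m]
      | none => ans)
    = (match (toksOf c).drop 1 |>.foldl (fun (acc : Option Int) it =>
          match acc, first.get? it with
          | some a, some v => some (max a v)
          | _, _ => none) (some 0) with
      | none => ans
      | some j0 =>
        match scanB ((toksOf c).headD []) ((plans.map prOf).drop j0.toNat) j0 with
        | some r => ans ++ [r]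
        | none => ans) := by
  set c0 := (toksOf c).headD [] with hc0
  set items := (toksOf c).drop 1 with hitems
  set L := plans.length with hL
  set prices := plans.map prOf with hprices
  -- Q : the combined per-index test of A, expressed through fiN / prices
  set Q : Int → Bool := fun j =>
    (!decide (PySem.List.pyGetD prices j [] < c0)) &&
    items.all (fun x => match fiN x plans with
      | some kk => decide ((kk : Int) ≤ j)
      | none => false) with hQ
  -- step 1: A's index list is the filtered range
  have hidx : ((PySem.List.enumerate (buildA [] plans)).foldl (fun idx jp =>
          if decide (jp.2.headD [] < c0) then idx
          else if chkA items (jp.2.drop 1) then idx ++ [jp.1 + 1] else idx) [])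
      = ((PySem.List.pyRange 0 L 1).filter Q).map (· + 1) := by
    have hlen : PySem.List.len (buildA [] plans) = (L : Int) := by
      rw [PySem.List.len_eq, length_buildA]
    rw [PySem.List.enumerate_eq_map_pyRange (buildA [] plans) ([] : List (List Char)), hlen,
      List.foldl_map]
    trans List.foldl (fun idx j => if Q j then idx ++ [j + 1] else idx) [] (PySem.List.pyRange 0 (L : Int) 1)
    swap
    · rw [PySem.List.foldl_append_if, List.nil_append]
    apply PySem.List.foldl_congr_mem
    intro idx j hj
    rw [PySem.List.mem_pyRange_one] at hj
    obtain ⟨hj0, hjL⟩ := hj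
    set k := j.toNat with hk
    have hkL : k < plans.length := by omega
    have hjk : j = (k : Int) := by omega
    obtain ⟨tl, hget, hmem⟩ := buildA_get plans [] k hkL
    have hap : PySem.List.pyGetD (buildA [] plans) j [] = (toksOf plans[k]).take 1 ++ tl := by
      rw [PySem.List.pyGetD_eq_getElem _ _ hj0 (by rw [length_buildA]; exact_mod_cast hjL)]
      have : (buildA [] plans)[k]'(by rw [length_buildA]; exact hkL) = (toksOf plans[k]).take 1 ++ tl := by
        have := hget
        rwa [List.getElem?_eq_getElem (by rw [length_buildA]; exact hkL), Option.some.injEq] at this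
      exact this
    have htk : (toksOf plans[k]).take 1 = [prOf plans[k]] := by
      rw [toksOf_cons]; rfl
    have hpr : PySem.List.pyGetD prices j [] = prOf plans[k] := by
      rw [PySem.List.pyGetD_eq_getElem _ _ hj0 (by
        rw [hprices, List.length_map]; exact_mod_cast hjL)]
      simp [hprices, ← hk]
    have hhead : (PySem.List.pyGetD (buildA [] plans) j []).headD [] = PySem.List.pyGetD prices j [] := by
      rw [hap, htk, hpr]; rfl
    have hdrop : (PySem.List.pyGetD (buildA [] plans) j []).drop 1 = tl := by
      rw [hap, htk]; rfl
    have hchk : chkA items ((PySem.List.pyGetD (buildA [] plans) j []).drop 1)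
        = items.all (fun x => match fiN x plans with
            | some kk => decide ((kk : Int) ≤ j)
            | none => false) := by
      rw [hdrop, chkA_eq_all]
      apply List.all_congr rfl
      intro x
      rw [Bool.eq_iff_iff]
      constructor
      · intro hcont
        have hxtl : x ∈ tl := by simpa using hcont
        have := (hmem x).1 hxtl
        simp only [List.mem_nil_iff, or_false] at this
        obtain ⟨kk, hkk, hle⟩ := (cumMem_iff plans x k).1 this
        rw [hkk]
        simp; omega
      · intro hm
        rcases hfi : fiN x plans with _ | kk
        · rw [hfi] at hm; simp at hm
        · rw [hfi] at hm
          have hle : (kk : Int) ≤ j := by simpa using hm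
          have : x ∈ (plans.take (k+1)).flatMap itsOf :=
            (cumMem_iff plans x k).2 ⟨kk, hfi, by omega⟩
          have hxtl : x ∈ tl := (hmem x).2 (Or.inl this)
          simpa using hxtl
    rw [hhead, hchk]
    simp only [hQ]
    by_cases hp : PySem.List.pyGetD prices j [] < c0
    · simp [hp]
    · simp [hp]
  rw [hidx]
  rcases hcase : items.foldl (fun (acc : Option Int) it =>
      match acc, first.get? it with
      | some a, some v => some (max a v)
      | _, _ => none) (some 0) with _ | r
  · -- some required item never occurs: both sides skip
    obtain ⟨it, hit, hnone⟩ := ((j0_fold first items 0).1).mp hcase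
    have hfin : fiN it plans = none := by
      have := hfirst it
      rw [hnone] at this
      cases h : fiN it plans
      · rfl
      · rw [h] at this; simp at this
    have hfilter : (PySem.List.pyRange 0 (L : Int) 1).filter Q = [] := by
      rw [List.filter_eq_nil_iff]
      intro j hj
      simp only [hQ, Bool.and_eq_true, not_and]
      intro _
      rw [List.all_eq_true]
      push_neg
      refine ⟨it, hit, ?_⟩
      simp [hfin]
    rw [hfilter]
    simp [PySem.List.min?]
  · -- all items occur; r is the threshold index of B
    obtain ⟨hr0, hall, hrep⟩ := (j0_fold first items 0).2 r hcase
    have hfin_of_get : ∀ x v, first.get? x = some v → fiN x plans = some v.toNat := by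
      intro x v hv
      have := hfirst x
      rw [hv] at this
      rcases h : fiN x plans with _ | k
      · rw [h] at this; simp at this
      · rw [h] at this
        simp at this
        have hvk : v.toNat = k := by omega
        rw [hvk]
    by_cases hrL : r < (L : Int)
    · have hk0 : r = ((r.toNat : Nat) : Int) := by omega
      have hQfst : ∀ j, 0 ≤ j → j < r → Q j = false := by
        intro j hj0 hjr
        have hrpos : 0 < r := by omega
        rcases hrep with rfl | ⟨it, hit, hitg⟩
        · omega
        · simp only [hQ, Bool.and_eq_false_iff]
          right
          rw [List.all_eq_false]
          refine ⟨it, hit, ?_⟩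
          rw [hfin_of_get it r hitg]
          simp; omega
      have hQsnd : ∀ j, r ≤ j → Q j = (!decide (PySem.List.pyGetD prices j [] < c0)) := by
        intro j hjr
        simp only [hQ]
        have : items.all (fun x => match fiN x plans with
            | some kk => decide ((kk : Int) ≤ j)
            | none => false) = true := by
          rw [List.all_eq_true]
          intro x hx
          obtain ⟨v, hv, hvr⟩ := hall x hx
          rw [hfin_of_get x v hv]
          have hv0 : 0 ≤ v := by
            have := hfirst x
            rw [hv] at this
            rcases h : fiN x plans with _ | k
            · rw [h] at this; simp at this
            · rw [h] at this; simp at this; omega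
          simp; omega
        rw [this, Bool.and_true]
      have hsplit : PySem.List.pyRange 0 (L : Int) 1
          = PySem.List.pyRange 0 r 1 ++ PySem.List.pyRange r (L : Int) 1 :=
        PySem.List.pyRange_one_append 0 r (L : Int) (by omega) (by omega)
      have hf1 : (PySem.List.pyRange 0 r 1).filter Q = [] := by
        rw [List.filter_eq_nil_iff]
        intro j hj
        rw [PySem.List.mem_pyRange_one] at hj
        rw [hQfst j hj.1 hj.2]
        simp
      have hf2 : (PySem.List.pyRange r (L : Int) 1).filter Q
          = (PySem.List.pyRange r (L : Int) 1).filter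
              (fun j => !decide (PySem.List.pyGetD prices j [] < c0)) := by
        apply List.filter_congr
        intro j hj
        rw [PySem.List.mem_pyRange_one] at hj
        exact hQsnd j hj.1
      have hmin : PySem.List.min? (((PySem.List.pyRange 0 (L : Int) 1).filter Q).map (· + 1)) (fun x => x)
          = ((((PySem.List.pyRange r (L : Int) 1).filter
              (fun j => !decide (PySem.List.pyGetD prices j [] < c0))).map (· + 1)).head?) := by
        rw [hsplit, List.filter_append, hf1, List.nil_append, hf2]
        apply min?_eq_head?_of_pairwise
        apply List.Pairwise.map (R := (· < ·))
        · intro a b hab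
          omega
        · exact List.Pairwise.sublist List.filter_sublist (PySem.List.pairwise_lt_pyRange_one r (L : Int))
      have hscan : scanB c0 (prices.drop r.toNat) r
          = ((((PySem.List.pyRange r (L : Int) 1).filter
              (fun j => !decide (PySem.List.pyGetD prices j [] < c0))).map (· + 1)).head?) := by
        have hlenp : prices.length = L := by rw [hprices, List.length_map]
        have := scanB_spec c0 prices r.toNat (by omega)
        rw [hlenp] at this
        rw [hk0]
        simp only [Int.toNat_natCast]
        exact this
      rcases hv : ((((PySem.List.pyRange r (L : Int) 1).filter
          (fun j => !decide (PySem.List.pyGetD prices j [] < c0))).map (· + 1)).head?) with _ | v <;>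
        simp only [hmin, hscan, hv]
    · -- r ≥ L is only reachable with no plans at all; both sides skip
      have hL0 : L = 0 := by
        rcases hrep with rfl | ⟨it, hit, hitg⟩
        · omega
        · have := fiN_lt_length (hfin_of_get it r hitg)
          omega
      have h1 : (PySem.List.pyRange 0 (L : Int) 1) = [] := by
        rw [hL0]; exact PySem.List.pyRange_one_eq_nil (by omega)
      have h2 : prices.drop r.toNat = [] := by
        rw [List.drop_eq_nil_iff]
        rw [hprices, List.length_map]
        omega
      rw [h1]
      simp [PySem.List.min?, h2, scanB]

-- ===== VERDICT (by name: the statement is the Claim_ definition above) =====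
theorem solution_spec : Claim_equal_solution := by
  intro n plans clients _
  show solution n plans clients = solution_alt n plans clients
  rw [solution, solution_alt]
  simp only [foldlA_eq plans [] [], List.nil_append]
  apply PySem.List.foldl_congr_mem
  intro ans c _
  have hfirst : ∀ x, ((PySem.List.enumerate plans).foldl (fun d jp =>
      ((PySem.Chars.splitOn jp.2.toList [' ']).drop 1).foldl (fun d it =>
          if d.contains it then d else d.insert it jp.1) d) PySem.Dict.empty).get? x
        = (fiN x plans).map (fun k => (k : Int)) := by
    intro x
    rw [dict_get plans 0 PySem.Dict.empty x]
    rw [PySem.Dict.get?_empty]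
    cases fiN x plans <;> simp
  have := client_eq plans _ hfirst c ans
  simpa only [toksOf, prOf, itsOf] using this
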